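-- pv_equiv track=rewrite | github.com/ivantrykosh/KPI-DA-1 | Laba 2/Laba-Python/main.py | same_color
-- ===== SOURCE A (Python) =====
-- def same_color(graph, edges):
--     """Функція для визначення кількості конфліктів"""
--     number = 0
--     for i in range(len(edges)):
--         for j in range(i):
--             if graph[i][j]:
--                 if edges[i] == edges[j]:
--                     number += 1
--     return number
-- ===== SOURCE B (Python) =====
-- def same_color(graph, edges):
--     groups = {}
--     for i, c in enumerate(edges):
--         groups.setdefault(c, []).append(i)
--     total = 0
--     for members in groups.values():
--         for k in range(len(members)):
--             for l in range(k):
--                 if graph[members[k]][members[l]]: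
--                     total += 1
--     return total
-- ===== Notes on version B (the rewrite author's own statement) =====
-- stated objective: alternative
-- what changed: A scans every lower-triangle index pair and tests colour equality per pair; B first builds a dict grouping vertex indices by colour in one pass and then counts adjacent pairs only within each colour group.
import Mathlib
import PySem

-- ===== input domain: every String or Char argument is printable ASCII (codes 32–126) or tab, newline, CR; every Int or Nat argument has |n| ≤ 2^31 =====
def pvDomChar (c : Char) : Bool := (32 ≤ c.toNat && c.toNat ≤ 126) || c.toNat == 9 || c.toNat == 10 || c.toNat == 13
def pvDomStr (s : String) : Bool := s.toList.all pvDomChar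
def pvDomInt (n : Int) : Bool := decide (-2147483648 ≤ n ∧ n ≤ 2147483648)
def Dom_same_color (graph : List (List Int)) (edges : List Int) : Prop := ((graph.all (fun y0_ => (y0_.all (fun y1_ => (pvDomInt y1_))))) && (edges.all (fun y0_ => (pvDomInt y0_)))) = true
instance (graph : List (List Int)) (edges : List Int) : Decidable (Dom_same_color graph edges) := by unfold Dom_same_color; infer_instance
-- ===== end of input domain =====

-- B replaces A's flat lower-triangle scan by a colour → indices grouping dict followed by a
-- per-group pairwise pass (objective: alternative decomposition, same worst-case cost).

-- ===== PORT A =====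
def same_color (graph : List (List Int)) (edges : List Int) : Int :=
  (List.range edges.length).foldl (fun number i =>
    (List.range i).foldl (fun number j =>
      if (graph.getD i []).getD j 0 ≠ 0 then
        (if edges.getD i 0 = edges.getD j 0 then number + 1 else number)
      else number) number) 0

-- ===== PORT B =====
def same_color_alt (graph : List (List Int)) (edges : List Int) : Int :=
  let groups : PySem.Dict Int (List Int) :=
    (PySem.List.enumerate edges 0).foldl
      (fun d ic => d.modify ic.2 [] (· ++ [ic.1])) PySem.Dict.empty
  groups.values.foldl (fun total ms =>
    (List.range ms.length).foldl (fun total k =>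
      (List.range k).foldl (fun total l =>
        if PySem.List.pyGetD (PySem.List.pyGetD graph (ms.getD k 0) []) (ms.getD l 0) 0 ≠ 0
        then total + 1 else total) total) total) 0

-- ===== PRECONDITION & SPEC =====
-- Pre_ excludes exactly the inputs where A raises IndexError: it needs graph to hold a row of
-- length ≥ i for every index 1 ≤ i < len(edges).
def Pre_same_color (graph : List (List Int)) (edges : List Int) : Prop :=
  ∀ i : Nat, i < edges.length → 1 ≤ i → i < graph.length ∧ i ≤ (graph.getD i []).length
instance (graph : List (List Int)) (edges : List Int) : Decidable (Pre_same_color graph edges) := by unfold Pre_same_color; infer_instance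
def pvWitness_same_color : List (List Int) × List Int := ([[0], [1, 0], [1, 1, 0]], [2, 3, 2])
def Spec_same_color (graph : List (List Int)) (edges : List Int) (out : Int) : Prop := out = same_color_alt graph edges
instance (graph : List (List Int)) (edges : List Int) (out : Int) : Decidable (Spec_same_color graph edges out) := by unfold Spec_same_color; infer_instance

-- ===== CLAIM (what is proved, stated in full; the proofs are below) =====
def Claim_equal_same_color : Prop := ∀ (graph : List (List Int)) (edges : List Int), Dom_same_color graph edges → Pre_same_color graph edges → Spec_same_color graph edges (same_color graph edges)

-- ===== LEMMAS AND PROOFS =====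

-- the j<i entry of graph, as B's port reads it (Int indices)
def pvGv (graph : List (List Int)) (a b : Int) : Int :=
  PySem.List.pyGetD (PySem.List.pyGetD graph a []) b 0

-- the number A adds while processing index i
def pvCnt (graph : List (List Int)) (edges : List Int) (i : Nat) : Nat :=
  (List.range i).countP (fun j =>
    decide ((graph.getD i []).getD j 0 ≠ 0 ∧ edges.getD i 0 = edges.getD j 0))

-- the members list B's dict associates with colour c after processing the first t indices
def pvGrp (edges : List Int) (c : Int) (t : Nat) : List Int :=
  ((List.range t).filter (fun j => edges.getD j 0 == c)).map Int.ofNat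

-- the number B adds for one members list
def pvF (graph : List (List Int)) (ms : List Int) : Int :=
  ((List.range ms.length).map (fun k =>
    (((List.range k).countP (fun l => decide (pvGv graph (ms.getD k 0) (ms.getD l 0) ≠ 0))) : Int))).sum

-- A is the sum over i of the count it adds at i
theorem pvA_eq_sum (graph : List (List Int)) (edges : List Int) :
    same_color graph edges =
      ((List.range edges.length).map (fun i => (pvCnt graph edges i : Int))).sum := by
  unfold same_color pvCnt
  rw [PySem.List.foldl_congr_mem (g := fun (number : Int) i => number +
      (((List.range i).countP (fun j =>
        decide ((graph.getD i []).getD j 0 ≠ 0 ∧ edges.getD i 0 = edges.getD j 0))) : Int))]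
  · rw [PySem.List.foldl_add]; simp
  · intro acc i _
    rw [PySem.List.foldl_congr_mem (g := fun (number : Int) j =>
        if ((graph.getD i []).getD j 0 ≠ 0 ∧ edges.getD i 0 = edges.getD j 0) then number + 1 else number)]
    · rw [PySem.List.foldl_ite_add_one]
    · intro acc' j _
      split_ifs <;> tauto

-- B is the sum, over the distinct colours, of pvF of that colour's full members list
theorem pvB_eq_sum (graph : List (List Int)) (edges : List Int) :
    same_color_alt graph edges =
      ((PySem.Set.ofList edges).map (fun c => pvF graph (pvGrp edges c edges.length))).sum := by
  unfold same_color_alt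
  show ((PySem.List.enumerate edges 0).foldl
        (fun d ic => d.modify ic.2 [] (· ++ [ic.1])) PySem.Dict.empty).values.foldl _ _ = _
  set groups : PySem.Dict Int (List Int) :=
      (PySem.List.enumerate edges 0).foldl
        (fun d ic => d.modify ic.2 [] (· ++ [ic.1])) PySem.Dict.empty with hg
  rw [PySem.List.foldl_congr_mem (g := fun (total : Int) ms => total + pvF graph ms)]
  · rw [PySem.List.foldl_add]
    rw [zero_add]
    have hM : groups = ((PySem.List.enumerate edges 0).map (fun ic => (ic.2, ic.1))).foldl
        (fun d p => d.modify p.1 [] (· ++ [p.2])) PySem.Dict.empty := by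
      rw [List.foldl_map]
    have hkeys : groups.keys = PySem.Set.ofList edges := by
      rw [hM, PySem.Dict.keys_foldl_modify_key]
      simp only [PySem.Set.update, PySem.Set.ofList_eq_foldl, List.map_map]
      rw [show (Prod.fst ∘ fun (ic : Int × Int) => (ic.2, ic.1)) = (fun ic => ic.2) from rfl,
        PySem.List.map_snd_enumerate]
      rfl
    have hnd : groups.keys.Nodup := by
      rw [hM]; exact PySem.Dict.nodup_keys_foldl_modify_key _ _ _ _ _ PySem.Dict.nodup_keys_empty
    have hget : ∀ c, groups.getD c [] = pvGrp edges c edges.length := by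
      intro c
      rw [hM, PySem.Dict.getD_foldl_modify_append]
      rw [PySem.Dict.getD_empty, List.nil_append]
      rw [PySem.List.enumerate_eq_map_pyRange (d := 0)]
      rw [PySem.List.len_eq, PySem.List.pyRange_zero_natCast]
      rw [List.map_map, List.map_map, List.filter_map, List.map_map]
      unfold pvGrp
      have hfil : List.filter ((fun (p : Int × Int) => p.1 == c) ∘ ((fun (ic : Int × Int) => (ic.2, ic.1)) ∘ fun j => (j, PySem.List.pyGetD edges j 0)) ∘ fun (k : Nat) => (k : Int)) (List.range edges.length) = List.filter (fun j => edges.getD j 0 == c) (List.range edges.length) := by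
        apply List.filter_congr
        intro j hj
        show (PySem.List.pyGetD edges (j : Int) 0 == c) = _
        rw [PySem.List.pyGetD_natCast]
      rw [hfil]
      rfl
    rw [PySem.Dict.values_eq_map_keys groups hnd []]
    rw [hkeys, List.map_map]
    congr 1
    apply List.map_congr_left
    intro c _
    simp only [Function.comp]
    rw [hget]
  · intro acc ms _
    rw [PySem.List.foldl_congr_mem (g := fun (total : Int) k => total +
        (((List.range k).countP (fun l => decide (pvGv graph (ms.getD k 0) (ms.getD l 0) ≠ 0))) : Int))]
    · rw [PySem.List.foldl_add]; rfl
    · intro acc' k _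
      rw [PySem.List.foldl_ite_add_one]
      rfl

-- positional countP over a list is countP of the list itself
theorem countP_range_getD (ms : List Int) (p : Int → Bool) :
    (List.range ms.length).countP (fun l => p (ms.getD l 0)) = ms.countP p := by
  have hmap : (List.range ms.length).map (fun l => ms.getD l 0) = ms := by
    apply List.ext_getElem
    · simp
    · intro i h1 h2
      simp [List.getD_eq_getElem?_getD, List.getElem?_eq_getElem h2]
  conv_rhs => rw [← hmap]
  rw [List.countP_map]
  rfl

-- appending one member adds its pair-count against all earlier members
theorem pvF_append (graph : List (List Int)) (ms : List Int) (x : Int) :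
    pvF graph (ms ++ [x]) = pvF graph ms
      + (ms.countP (fun a => decide (pvGv graph x a ≠ 0)) : Int) := by
  unfold pvF
  rw [List.length_append, List.length_cons, List.length_nil, Nat.zero_add, List.range_succ,
    List.map_append, List.sum_append]
  congr 1
  · congr 1
    apply List.map_congr_left
    intro k hk
    rw [List.mem_range] at hk
    congr 1
    apply List.countP_congr
    intro l hl
    rw [List.mem_range] at hl
    have h1 : (ms ++ [x]).getD k 0 = ms.getD k 0 := by
      rw [List.getD_eq_getElem?_getD, List.getD_eq_getElem?_getD, List.getElem?_append_left hk]
    have h2 : (ms ++ [x]).getD l 0 = ms.getD l 0 := by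
      rw [List.getD_eq_getElem?_getD, List.getD_eq_getElem?_getD,
        List.getElem?_append_left (Nat.lt_trans hl hk)]
    rw [h1, h2]
  · simp only [List.map_cons, List.map_nil, List.sum_cons, List.sum_nil, add_zero]
    have hx : (ms ++ [x]).getD ms.length 0 = x := by
      rw [List.getD_eq_getElem?_getD, List.getElem?_append_right (Nat.le_refl _)]
      simp
    rw [hx]
    congr 1
    rw [← countP_range_getD ms (fun a => decide (pvGv graph x a ≠ 0))]
    apply List.countP_congr
    intro l hl
    rw [List.mem_range] at hl
    have : (ms ++ [x]).getD l 0 = ms.getD l 0 := by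
      rw [List.getD_eq_getElem?_getD, List.getD_eq_getElem?_getD, List.getElem?_append_left hl]
    rw [this]

-- one colour group contributes exactly what A adds at the indices of that colour
theorem pvGroup_sum (graph : List (List Int)) (edges : List Int) (c : Int) (t : Nat) :
    pvF graph (pvGrp edges c t) =
      (((List.range t).filter (fun i => edges.getD i 0 == c)).map
        (fun i => (pvCnt graph edges i : Int))).sum := by
  induction t with
  | zero => simp [pvGrp, pvF]
  | succ t ih =>
    have hfilt : List.filter (fun j => edges.getD j 0 == c) (List.range (t + 1))
        = List.filter (fun j => edges.getD j 0 == c) (List.range t)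
          ++ List.filter (fun j => edges.getD j 0 == c) [t] := by
      rw [List.range_succ, List.filter_append]
    by_cases h : (edges.getD t 0 == c) = true
    · have h1 : List.filter (fun j => edges.getD j 0 == c) [t] = [t] := by
        rw [List.filter_cons, if_pos h, List.filter_nil]
      have hgrp : pvGrp edges c (t + 1) = pvGrp edges c t ++ [Int.ofNat t] := by
        unfold pvGrp
        rw [hfilt, h1, List.map_append]
        rfl
      rw [hgrp, pvF_append, ih, hfilt, h1, List.map_append, List.sum_append]
      congr 1
      rw [List.map_cons, List.map_nil, List.sum_cons, List.sum_nil, add_zero]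
      congr 1
      unfold pvGrp pvCnt
      rw [List.countP_map, List.countP_filter]
      apply List.countP_congr
      intro j hj
      rw [List.mem_range] at hj
      have hgv : pvGv graph (Int.ofNat t) (Int.ofNat j) = (graph.getD t []).getD j 0 := by
        simp [pvGv, PySem.List.pyGetD_natCast]
      have hc : edges.getD t 0 = c := beq_iff_eq.mp h
      simp only [Function.comp_apply, hgv, hc]
      constructor
      · intro hb
        simp only [Bool.and_eq_true, decide_eq_true_eq, beq_iff_eq] at hb
        simp only [decide_eq_true_eq]
        exact ⟨hb.1, hb.2.symm⟩
      · intro hb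
        simp only [decide_eq_true_eq] at hb
        simp only [Bool.and_eq_true, decide_eq_true_eq, beq_iff_eq]
        exact ⟨hb.1, hb.2.symm⟩
    · have h1 : List.filter (fun j => edges.getD j 0 == c) [t] = [] := by
        rw [List.filter_cons, if_neg h, List.filter_nil]
      have hgrp : pvGrp edges c (t + 1) = pvGrp edges c t := by
        unfold pvGrp
        rw [hfilt, h1, List.append_nil]
      rw [hgrp, ih, hfilt, h1, List.append_nil]

-- a one-hot sum over a duplicate-free key list picks out its single term
theorem sum_map_ite_mem (K : List Int) (hnd : K.Nodup) (k : Int) (hk : k ∈ K) (δ : Int) :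
    (K.map (fun c => if k == c then δ else 0)).sum = δ := by
  induction K with
  | nil => cases hk
  | cons a K' ih =>
    rcases List.mem_cons.mp hk with h | h
    · subst h
      simp only [List.map_cons, List.sum_cons, beq_self_eq_true, if_true]
      have hnot : k ∉ K' := (List.nodup_cons.mp hnd).1
      have : (K'.map (fun c => if k == c then δ else 0)).sum = 0 := by
        rw [List.sum_eq_zero]
        intro x hx
        rcases List.mem_map.mp hx with ⟨c, hc, rfl⟩
        have : ¬ (k = c) := fun h => hnot (h ▸ hc)
        simp [this]
      rw [this, add_zero]
    · have hnd' := (List.nodup_cons.mp hnd).2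
      have hne : ¬ (k = a) := by
        rintro rfl; exact (List.nodup_cons.mp hnd).1 h
      simp only [List.map_cons, List.sum_cons, ih hnd' h]
      simp [hne]

-- grouping by key and summing per group is summing over everything
theorem pvPartition (w : Nat → Int) (key : Nat → Int) (K : List Int) (hnd : K.Nodup)
    (idxs : List Nat) (hmem : ∀ i ∈ idxs, key i ∈ K) :
    (K.map (fun c => ((idxs.filter (fun i => key i == c)).map w).sum)).sum
      = (idxs.map w).sum := by
  induction idxs with
  | nil => simp
  | cons x t ih =>
    have hx := hmem x (List.mem_cons_self)
    have hmem' : ∀ i ∈ t, key i ∈ K := fun i hi => hmem i (List.mem_cons_of_mem _ hi)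
    have hsplit : ∀ c : Int, (((x :: t).filter (fun i => key i == c)).map w).sum
        = (if key x == c then w x else 0) + ((t.filter (fun i => key i == c)).map w).sum := by
      intro c
      by_cases h : key x == c
      · simp [h]
      · simp [h]
    calc (K.map (fun c => (((x :: t).filter (fun i => key i == c)).map w).sum)).sum
        = (K.map (fun c => (if key x == c then w x else 0)
            + ((t.filter (fun i => key i == c)).map w).sum)).sum := by
          exact congrArg _ (List.map_congr_left (fun c _ => hsplit c))
      _ = (K.map (fun c => if key x == c then w x else 0)).sum
            + (K.map (fun c => ((t.filter (fun i => key i == c)).map w).sum)).sum := by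
          rw [← List.sum_map_add]
      _ = w x + (t.map w).sum := by rw [sum_map_ite_mem K hnd _ hx, ih hmem']
      _ = ((x :: t).map w).sum := by simp

-- ===== VERDICT (by name: the statement is the Claim_ definition above) =====
theorem same_color_spec : Claim_equal_same_color := by
  intro graph edges _ _
  unfold Spec_same_color
  rw [pvA_eq_sum, pvB_eq_sum]
  rw [← pvPartition (fun i => (pvCnt graph edges i : Int)) (fun i => edges.getD i 0)
      (PySem.Set.ofList edges) (PySem.Set.nodup_ofList edges) (List.range edges.length)
      (by intro i hi
          rw [List.mem_range] at hi
          rw [PySem.Set.mem_ofList]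
          show edges.getD i 0 ∈ edges
          rw [List.getD_eq_getElem edges 0 hi]
          exact List.getElem_mem hi)]
  congr 1
  apply List.map_congr_left
  intro c _
  exact (pvGroup_sum graph edges c edges.length).symm
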